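-- pv_equiv track=rewrite | github.com/zuuxuux/LLean | llean/tactic_models.py | _split_arguments
-- ===== SOURCE A (Python) =====
-- def _split_arguments(argument_block: str) -> list[str]:
--     """Split a comma separated block while respecting bracket nesting."""
--
--     entries: list[str] = []
--     current: list[str] = []
--     depth = 0
--     for char in argument_block:
--         if char == "," and depth == 0:
--             entry = "".join(current).strip()
--             if entry:
--                 entries.append(entry)
--             current = []
--             continue
--         if char in "([{":
--             depth += 1
--         elif char in ")]}":
--             depth = max(depth - 1, 0)
--         current.append(char)
--
--     tail = "".join(current).strip()
--     if tail:
--         entries.append(tail)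
--     return entries
-- ===== SOURCE B (Python) =====
-- def _split_arguments(argument_block: str) -> list[str]:
--     """Split a comma separated block while respecting bracket nesting."""
--
--     entries: list[str] = []
--     buffer: list[str] = []
--     depth = 0
--     for token in argument_block.split(","):
--         for ch in token:
--             if ch in "([{":
--                 depth += 1
--             elif ch in ")]}":
--                 depth = max(depth - 1, 0)
--         if depth == 0:
--             entry = ",".join(buffer + [token]).strip()
--             if entry:
--                 entries.append(entry)
--             buffer = []
--         else:
--             buffer.append(token)
--     tail = ",".join(buffer).strip()
--     if tail:
--         entries.append(tail)
--     return entries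
-- ===== Notes on version B (the rewrite author's own statement) =====
-- stated objective: alternative
-- what changed: B replaces A's per-character state machine (entries/current/depth in one loop) by a naive split on ',' followed by a token-merge pass that tracks a clamped bracket depth per token and joins buffered tokens back with ',' when depth returns to 0.
import Mathlib
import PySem

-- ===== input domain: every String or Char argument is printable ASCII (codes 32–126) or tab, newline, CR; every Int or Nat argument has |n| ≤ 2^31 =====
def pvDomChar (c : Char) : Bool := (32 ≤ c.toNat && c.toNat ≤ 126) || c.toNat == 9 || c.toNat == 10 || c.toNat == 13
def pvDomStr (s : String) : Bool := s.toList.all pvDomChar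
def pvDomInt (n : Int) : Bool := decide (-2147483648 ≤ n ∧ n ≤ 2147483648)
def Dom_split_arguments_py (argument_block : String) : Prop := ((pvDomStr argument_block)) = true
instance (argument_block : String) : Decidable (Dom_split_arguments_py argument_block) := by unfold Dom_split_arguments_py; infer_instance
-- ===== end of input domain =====

-- B replaces A's per-character state machine by a naive split on ',' plus a token-merge pass
-- with a clamped per-token bracket depth; same cost, different decomposition.

-- shared by both ports: "entry = text.strip(); if entry: entries.append(entry)"
def pvAddEntry (entries : List String) (text : List Char) : List String :=
  let entry := PySem.Chars.strip text
  if entry ≠ [] then entries ++ [String.mk entry] else entries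

-- ===== PORT A =====
-- one iteration of A's "for char in argument_block" loop over state (entries, current, depth)
def pvStepA (st : List String × List Char × Int) (c : Char) : List String × List Char × Int :=
  match st with
  | (entries, current, depth) =>
    if c = ',' ∧ depth = 0 then
      (pvAddEntry entries current, [], depth)
    else
      let depth := if c = '(' ∨ c = '[' ∨ c = '{' then depth + 1
                   else if c = ')' ∨ c = ']' ∨ c = '}' then max (depth - 1) 0
                   else depth
      (entries, current ++ [c], depth)

def split_arguments_py (argument_block : String) : List String :=
  let r := argument_block.toList.foldl pvStepA ([], [], 0)
  pvAddEntry r.1 r.2.1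

-- ===== PORT B =====
-- B's inner "for ch in token" loop: clamped bracket depth after a token
def pvTokDepth (depth : Int) (token : List Char) : Int :=
  token.foldl (fun d c =>
    if c = '(' ∨ c = '[' ∨ c = '{' then d + 1
    else if c = ')' ∨ c = ']' ∨ c = '}' then max (d - 1) 0
    else d) depth

-- one iteration of B's "for token in argument_block.split(',')" loop over (entries, buffer, depth)
def pvStepB (st : List String × List (List Char) × Int) (token : List Char) :
    List String × List (List Char) × Int :=
  match st with
  | (entries, buffer, depth) =>
    let depth := pvTokDepth depth token
    if depth = 0 then
      (pvAddEntry entries (List.intercalate [','] (buffer ++ [token])), [], depth)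
    else
      (entries, buffer ++ [token], depth)

def split_arguments_py_alt (argument_block : String) : List String :=
  let r := (argument_block.toList.splitOn ',').foldl pvStepB ([], [], 0)
  pvAddEntry r.1 (List.intercalate [','] r.2.1)

-- ===== PRECONDITION & SPEC =====
def Spec_split_arguments_py (argument_block : String) (out : List String) : Prop := out = split_arguments_py_alt argument_block
instance (argument_block : String) (out : List String) : Decidable (Spec_split_arguments_py argument_block out) := by unfold Spec_split_arguments_py; infer_instance

-- ===== CLAIM (what is proved, stated in full; the proofs are below) =====
def Claim_equal_split_arguments_py : Prop := ∀ (argument_block : String), Dom_split_arguments_py argument_block → Spec_split_arguments_py argument_block (split_arguments_py argument_block)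

-- ===== LEMMAS AND PROOFS =====

-- the part of ','.join that follows the first token
def pvRestJoin : List (List Char) → List Char
  | [] => []
  | t :: ts => ',' :: (t ++ pvRestJoin ts)

theorem pvIntercalate_eq (t : List Char) (ts : List (List Char)) :
    List.intercalate [','] (t :: ts) = t ++ pvRestJoin ts := by
  induction ts generalizing t with
  | nil => simp [List.intercalate, pvRestJoin]
  | cons u us ih =>
    simp only [List.intercalate, List.intersperse, List.flatten, pvRestJoin] at *
    simp [List.intercalate] at ih ⊢
    simp [ih]

theorem pvRestJoin_append (ts : List (List Char)) (t : List Char) :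
    pvRestJoin (ts ++ [t]) = pvRestJoin ts ++ ',' :: t := by
  induction ts with
  | nil => simp [pvRestJoin]
  | cons u us ih => simp [pvRestJoin, ih]

theorem pvIntercalate_append (buf : List (List Char)) (t : List Char) (h : buf ≠ []) :
    List.intercalate [','] (buf ++ [t]) = List.intercalate [','] buf ++ ',' :: t := by
  obtain ⟨b, bs, rfl⟩ := List.exists_cons_of_ne_nil h
  rw [List.cons_append, pvIntercalate_eq, pvIntercalate_eq, pvRestJoin_append]
  simp

theorem pvIntercalate_single (t : List Char) : List.intercalate [','] [t] = t := by
  simpa [pvRestJoin] using pvIntercalate_eq t []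

theorem pvAddEntry_nil (e : List String) : pvAddEntry e [] = e := by
  have h : PySem.Chars.strip ([] : List Char) = [] := by decide
  simp [pvAddEntry, h]

-- A's loop over a comma-free token just appends it and updates the depth
theorem pvProcTok (t : List Char) (h : ',' ∉ t) (e : List String) (cur : List Char) (d : Int) :
    List.foldl pvStepA (e, cur, d) t = (e, cur ++ t, pvTokDepth d t) := by
  induction t generalizing cur d with
  | nil => simp [pvTokDepth]
  | cons c cs ih =>
    have hc : c ≠ ',' := fun hh => h (hh ▸ List.mem_cons_self)
    have h' : ',' ∉ cs := fun hh => h (List.mem_cons_of_mem _ hh)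
    simp only [List.foldl_cons, pvStepA, pvTokDepth]
    rw [if_neg (by simp [hc])]
    simp only [pvTokDepth] at ih
    rw [ih h']
    simp

-- every piece of splitOn is comma-free
theorem pvSplitOn_free (l : List Char) : ∀ t ∈ l.splitOn ',', ',' ∉ t := by
  have : ∀ l : List Char, ∀ t ∈ l.splitOnP (· == ','), ',' ∉ t := by
    intro l
    induction l with
    | nil => intro t ht; rw [List.splitOnP_nil] at ht; simp at ht; simp [ht]
    | cons c cs ih =>
      intro t ht
      rw [List.splitOnP_cons] at ht
      by_cases hc : c = ','
      · rw [if_pos (by simp [hc])] at ht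
        rcases List.mem_cons.1 ht with h1 | h1
        · simp [h1]
        · exact ih t h1
      · rw [if_neg (by simp [hc])] at ht
        obtain ⟨h0, rest, hr⟩ := List.exists_cons_of_ne_nil (List.splitOnP_ne_nil _ cs)
        rw [hr] at ht
        simp only [List.modifyHead] at ht
        rcases List.mem_cons.1 ht with h1 | h1
        · subst h1
          intro hm
          rcases List.mem_cons.1 hm with h2 | h2
          · exact hc h2.symm
          · exact ih h0 (hr ▸ List.mem_cons_self) h2
        · exact ih t (hr ▸ List.mem_cons_of_mem _ h1)
  exact this l

-- main simulation invariant: relate A's state to B's state between tokens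
theorem pvMain (ts : List (List Char)) (hfree : ∀ t ∈ ts, ',' ∉ t) :
    ∀ (e : List String) (cur : List Char) (d : Int) (eB : List String) (buf : List (List Char)),
    (d = 0 → eB = pvAddEntry e cur ∧ buf = []) →
    (d ≠ 0 → eB = e ∧ cur = List.intercalate [','] buf ∧ buf ≠ []) →
    (let r := List.foldl pvStepA (e, cur, d) (pvRestJoin ts); pvAddEntry r.1 r.2.1) =
    (let r := List.foldl pvStepB (eB, buf, d) ts; pvAddEntry r.1 (List.intercalate [','] r.2.1)) := by
  induction ts with
  | nil =>
    intro e cur d eB buf h0 h1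
    by_cases hd : d = 0
    · obtain ⟨he, hb⟩ := h0 hd
      simp [pvRestJoin, he, hb, List.intercalate, pvAddEntry_nil]
    · obtain ⟨he, hc, _⟩ := h1 hd
      simp [pvRestJoin, he, hc]
  | cons t ts ih =>
    intro e cur d eB buf h0 h1
    have htf : ',' ∉ t := hfree t List.mem_cons_self
    have hfree' : ∀ u ∈ ts, ',' ∉ u := fun u hu => hfree u (List.mem_cons_of_mem _ hu)
    simp only [pvRestJoin, List.foldl_cons]
    by_cases hd : d = 0
    · obtain ⟨he, hb⟩ := h0 hd
      have hstep : pvStepA (e, cur, d) ',' = (eB, [], d) := by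
        simp [pvStepA, hd, he]
      rw [hstep, List.foldl_append, pvProcTok t htf]
      have hstepB : pvStepB (eB, buf, d) t = 
          (if pvTokDepth d t = 0
           then (pvAddEntry eB t, [], pvTokDepth d t)
           else (eB, [t], pvTokDepth d t)) := by
        simp [pvStepB, hb, pvIntercalate_single]
      rw [hstepB]
      by_cases hd1 : pvTokDepth d t = 0
      · rw [if_pos hd1]
        exact ih hfree' eB ([] ++ t) (pvTokDepth d t) (pvAddEntry eB t) []
          (fun _ => by simp) (fun hh => absurd hd1 hh)
      · rw [if_neg hd1]
        exact ih hfree' eB ([] ++ t) (pvTokDepth d t) eB [t]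
          (fun hh => absurd hh hd1) (fun _ => by simp [pvIntercalate_single])
    · obtain ⟨he, hc, hbne⟩ := h1 hd
      have hstep : pvStepA (e, cur, d) ',' = (e, cur ++ [','], d) := by
        simp [pvStepA, hd]
      rw [hstep, List.foldl_append, pvProcTok t htf]
      have hcur : (cur ++ [',']) ++ t = List.intercalate [','] (buf ++ [t]) := by
        rw [pvIntercalate_append buf t hbne, hc]; simp
      have hstepB : pvStepB (eB, buf, d) t =
          (if pvTokDepth d t = 0
           then (pvAddEntry e (List.intercalate [','] (buf ++ [t])), [], pvTokDepth d t)
           else (e, buf ++ [t], pvTokDepth d t)) := by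
        simp [pvStepB, he]
      rw [hstepB]
      by_cases hd1 : pvTokDepth d t = 0
      · rw [if_pos hd1]
        refine ih hfree' e ((cur ++ [',']) ++ t) (pvTokDepth d t)
          (pvAddEntry e (List.intercalate [','] (buf ++ [t]))) []
          (fun _ => by rw [hcur]; exact ⟨rfl, rfl⟩) (fun hh => absurd hd1 hh)
      · rw [if_neg hd1]
        exact ih hfree' e ((cur ++ [',']) ++ t) (pvTokDepth d t) e (buf ++ [t])
          (fun hh => absurd hh hd1) (fun _ => ⟨rfl, hcur, by simp⟩)

-- ===== VERDICT (by name: the statement is the Claim_ definition above) =====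
theorem split_arguments_py_spec : Claim_equal_split_arguments_py := by
  intro s _
  unfold Spec_split_arguments_py split_arguments_py split_arguments_py_alt
  obtain ⟨t₀, ts, hT⟩ := List.exists_cons_of_ne_nil (List.splitOnP_ne_nil _ s.toList)
  have hl : s.toList = t₀ ++ pvRestJoin ts := by
    conv_lhs => rw [← List.intercalate_splitOn s.toList ',']
    rw [show s.toList.splitOn ',' = t₀ :: ts from hT, pvIntercalate_eq]
  have hfree := pvSplitOn_free s.toList
  rw [show s.toList.splitOn ',' = t₀ :: ts from hT] at hfree ⊢
  have ht0 : ',' ∉ t₀ := hfree t₀ List.mem_cons_self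
  have hfree' : ∀ u ∈ ts, ',' ∉ u := fun u hu => hfree u (List.mem_cons_of_mem _ hu)
  rw [hl, List.foldl_append, pvProcTok t₀ ht0, List.foldl_cons]
  have hstepB : pvStepB ([], [], 0) t₀ =
      (if pvTokDepth 0 t₀ = 0
       then (pvAddEntry [] t₀, [], pvTokDepth 0 t₀)
       else ([], [t₀], pvTokDepth 0 t₀)) := by
    simp [pvStepB, pvIntercalate_single]
  rw [hstepB]
  by_cases hd1 : pvTokDepth 0 t₀ = 0
  · rw [if_pos hd1]
    exact pvMain ts hfree' [] ([] ++ t₀) (pvTokDepth 0 t₀) (pvAddEntry [] t₀) []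
      (fun _ => by simp) (fun hh => absurd hd1 hh)
  · rw [if_neg hd1]
    exact pvMain ts hfree' [] ([] ++ t₀) (pvTokDepth 0 t₀) [] [t₀]
      (fun hh => absurd hh hd1) (fun _ => by simp [pvIntercalate_single])
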